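-- pv_equiv track=rewrite | github.com/AnthonyBarbaro/BuzzAutomationPlatform | store_discount_roundup_sheet.py | _matrix_batches
-- ===== SOURCE A (Python) =====
-- from typing import Any, Iterable
--
-- SHEETS_WRITE_CHUNK_ROWS = 250
--
-- SHEETS_WRITE_CHUNK_CHARS = 900_000
--
-- def _matrix_batches(
--     matrix: list[list[Any]],
--     max_rows: int = SHEETS_WRITE_CHUNK_ROWS,
--     max_chars: int = SHEETS_WRITE_CHUNK_CHARS,
-- ) -> Iterable[tuple[int, list[list[Any]]]]:
--     start_index = 0
--     while start_index < len(matrix):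
--         batch: list[list[Any]] = []
--         batch_chars = 0
--         index = start_index
--         while index < len(matrix):
--             row = matrix[index]
--             row_chars = sum(len(str(value)) for value in row)
--             if batch and (len(batch) >= max_rows or batch_chars + row_chars > max_chars):
--                 break
--             batch.append(row)
--             batch_chars += row_chars
--             index += 1
--
--         yield start_index + 1, batch
--         start_index += len(batch)
-- ===== SOURCE B (Python) =====
-- SHEETS_WRITE_CHUNK_ROWS = 250
--
-- SHEETS_WRITE_CHUNK_CHARS = 900_000
--
-- def _matrix_batches(
--     matrix,
--     max_rows=SHEETS_WRITE_CHUNK_ROWS,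
--     max_chars=SHEETS_WRITE_CHUNK_CHARS,
-- ):
--     # one pass to precompute per-row character counts, then one flat greedy
--     # chunking pass over those counts (no nested rescan, no per-batch restart)
--     row_lengths = [sum(len(str(v)) for v in row) for row in matrix]
--     batches = []
--     start = 0
--     batch_len = 0
--     batch_chars = 0
--     for rl in row_lengths:
--         if batch_len and (batch_len >= max_rows or batch_chars + rl > max_chars):
--             batches.append((start + 1, matrix[start:start + batch_len]))
--             start += batch_len
--             batch_len = 0
--             batch_chars = 0
--         batch_len += 1
--         batch_chars += rl
--     if batch_len:
--         batches.append((start + 1, matrix[start:start + batch_len]))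
--     return batches
-- ===== Notes on version B (the rewrite author's own statement) =====
-- stated objective: simpler
-- what changed: Replaces A's nested while-loops (an inner loop restarted per batch, re-indexing into the matrix) by precomputing all row character counts in one pass and then a single flat greedy pass over those counts that flushes a batch (as a slice) whenever a limit would be exceeded.
import Mathlib
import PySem

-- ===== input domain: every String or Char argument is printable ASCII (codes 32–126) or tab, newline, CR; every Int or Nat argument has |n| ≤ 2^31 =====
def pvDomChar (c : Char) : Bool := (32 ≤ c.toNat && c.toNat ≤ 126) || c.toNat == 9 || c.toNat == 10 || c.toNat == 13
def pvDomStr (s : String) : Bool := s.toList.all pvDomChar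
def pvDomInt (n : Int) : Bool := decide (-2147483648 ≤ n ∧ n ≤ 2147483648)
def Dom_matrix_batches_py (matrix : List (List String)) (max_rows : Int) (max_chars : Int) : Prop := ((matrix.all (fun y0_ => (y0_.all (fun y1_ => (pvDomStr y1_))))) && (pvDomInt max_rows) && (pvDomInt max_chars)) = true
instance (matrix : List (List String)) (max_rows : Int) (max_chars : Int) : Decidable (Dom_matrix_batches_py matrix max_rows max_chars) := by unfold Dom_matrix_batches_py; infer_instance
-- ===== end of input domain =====

-- B replaces A's nested while-loops by a precompute-row-lengths pass plus one flat greedy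
-- chunking pass (flushing slices); objective: simpler decomposition, same exact output.


-- ===== PORT A =====
-- sum(len(str(value)) for value in row)  (str(value) is the identity on strings)
def pyRowChars (row : List String) : Int :=
  row.foldl (fun acc v => acc + PySem.Str.len v) 0

-- A's inner while loop, as structural recursion over the rows still to scan
-- (`rows` stands for matrix[index:], so `while index < len(matrix)` becomes the [] case)
def pyInnerA (max_rows max_chars : Int) :
    List (List String) → List (List String) → Int → List (List String)
  | [], batch, _ => batch
  | row :: rest, batch, batch_chars =>
    let row_chars := pyRowChars row
    if batch ≠ [] ∧ ((batch.length : Int) ≥ max_rows ∨ batch_chars + row_chars > max_chars) then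
      batch
    else
      pyInnerA max_rows max_chars rest (batch ++ [row]) (batch_chars + row_chars)

-- A's outer while loop; `fuel` is only a structural termination bound (matrix.length at the
-- top-level call suffices: every iteration advances start_index by at least one row)
def pyOuterA (matrix : List (List String)) (max_rows max_chars : Int) :
    Nat → Nat → List (Int × List (List String))
  | _, 0 => []
  | start_index, fuel + 1 =>
    if start_index < matrix.length then
      let batch := pyInnerA max_rows max_chars (matrix.drop start_index) [] 0
      ((start_index : Int) + 1, batch) ::
        pyOuterA matrix max_rows max_chars (start_index + batch.length) fuel
    else []

def matrix_batches_py (matrix : List (List String)) (max_rows : Int) (max_chars : Int) :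
    List (Int × List (List String)) :=
  pyOuterA matrix max_rows max_chars 0 matrix.length

-- ===== PORT B =====
-- one step of B's flat pass: maybe flush the pending batch, then count the current row in
def altStep (matrix : List (List String)) (max_rows max_chars : Int)
    (st : List (Int × List (List String)) × Int × Int × Int) (rl : Int) :
    List (Int × List (List String)) × Int × Int × Int :=
  match st with
  | (batches, start, batch_len, batch_chars) =>
    match (if batch_len ≠ 0 ∧ (batch_len ≥ max_rows ∨ batch_chars + rl > max_chars) then
            (batches ++ [(start + 1, PySem.List.slice matrix (some start) (some (start + batch_len)))],
             start + batch_len, (0 : Int), (0 : Int))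
          else (batches, start, batch_len, batch_chars)) with
    | (batches, start, batch_len, batch_chars) => (batches, start, batch_len + 1, batch_chars + rl)

def matrix_batches_py_alt (matrix : List (List String)) (max_rows : Int) (max_chars : Int) :
    List (Int × List (List String)) :=
  let row_lengths := matrix.map pyRowChars
  match row_lengths.foldl (altStep matrix max_rows max_chars) ([], 0, 0, 0) with
  | (batches, start, batch_len, _) =>
    if batch_len ≠ 0 then
      batches ++ [(start + 1, PySem.List.slice matrix (some start) (some (start + batch_len)))]
    else batches

-- ===== PRECONDITION & SPEC =====
def Spec_matrix_batches_py (matrix : List (List String)) (max_rows : Int) (max_chars : Int) (out : List (Int × List (List String))) : Prop := out = matrix_batches_py_alt matrix max_rows max_chars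
instance (matrix : List (List String)) (max_rows : Int) (max_chars : Int) (out : List (Int × List (List String))) : Decidable (Spec_matrix_batches_py matrix max_rows max_chars out) := by unfold Spec_matrix_batches_py; infer_instance

-- ===== CLAIM (what is proved, stated in full; the proofs are below) =====
def Claim_equal_matrix_batches_py : Prop := ∀ (matrix : List (List String)) (max_rows : Int) (max_chars : Int), Dom_matrix_batches_py matrix max_rows max_chars → Spec_matrix_batches_py matrix max_rows max_chars (matrix_batches_py matrix max_rows max_chars)

-- ===== LEMMAS AND PROOFS =====

-- one-step unfolding of A's inner loop
theorem pyInnerA_cons (max_rows max_chars : Int) (row : List String)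
    (rest batch : List (List String)) (bc : Int) :
    pyInnerA max_rows max_chars (row :: rest) batch bc =
      if batch ≠ [] ∧ ((batch.length : Int) ≥ max_rows ∨ bc + pyRowChars row > max_chars) then
        batch
      else pyInnerA max_rows max_chars rest (batch ++ [row]) (bc + pyRowChars row) := rfl

-- the inner loop never shrinks the batch …
theorem pyInnerA_len_le (max_rows max_chars : Int) :
    ∀ (rows batch : List (List String)) (bc : Int),
      batch.length ≤ (pyInnerA max_rows max_chars rows batch bc).length := by
  intro rows
  induction rows with
  | nil => intro batch bc; simp [pyInnerA]
  | cons row rest ih =>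
      intro batch bc
      rw [pyInnerA_cons]
      split_ifs
      · exact le_refl _
      · exact le_trans (by simp) (ih (batch ++ [row]) _)

-- … so at a valid start index it yields a nonempty batch
theorem pyInnerA_drop_pos (matrix : List (List String)) (max_rows max_chars : Int)
    (s : Nat) (hs : s < matrix.length) :
    0 < (pyInnerA max_rows max_chars (matrix.drop s) [] 0).length := by
  rw [List.drop_eq_getElem_cons hs, pyInnerA_cons, if_neg (by simp)]
  simp only [List.nil_append]
  have h2 := pyInnerA_len_le max_rows max_chars (matrix.drop (s + 1)) [matrix[s]]
      (0 + pyRowChars matrix[s])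
  simp only [List.length_cons, List.length_nil] at h2
  omega

-- the outer loop returns [] past the end, whatever the fuel
theorem pyOuterA_stop (matrix : List (List String)) (max_rows max_chars : Int)
    (s : Nat) (hs : ¬ s < matrix.length) :
    ∀ fuel, pyOuterA matrix max_rows max_chars s fuel = [] := by
  intro fuel
  cases fuel with
  | zero => rfl
  | succ g => simp only [pyOuterA]; rw [if_neg hs]

-- any two sufficient fuels give the same outer-loop result
theorem pyOuterA_fuel (matrix : List (List String)) (max_rows max_chars : Int) :
    ∀ (f f' s : Nat), matrix.length - s ≤ f → matrix.length - s ≤ f' →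
      pyOuterA matrix max_rows max_chars s f = pyOuterA matrix max_rows max_chars s f' := by
  intro f
  induction f with
  | zero =>
      intro f' s h h'
      have hs : ¬ s < matrix.length := by omega
      rw [pyOuterA_stop matrix max_rows max_chars s hs 0,
        pyOuterA_stop matrix max_rows max_chars s hs f']
  | succ g ih =>
      intro f' s h h'
      by_cases hs : s < matrix.length
      · obtain ⟨g', rfl⟩ : ∃ g', f' = g' + 1 := ⟨f' - 1, by omega⟩
        simp only [pyOuterA, hs, if_true]
        have hpos := pyInnerA_drop_pos matrix max_rows max_chars s hs
        congr 1
        apply ih <;> omega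
      · rw [pyOuterA_stop matrix max_rows max_chars s hs,
          pyOuterA_stop matrix max_rows max_chars s hs]

-- the segment xs[start:i] and its character count, used to tie both loops together
def seg {α : Type} (xs : List α) (start i : Nat) : List α :=
  (xs.drop start).take (i - start)

def sC (matrix : List (List String)) (start i : Nat) : Int :=
  (seg (matrix.map pyRowChars) start i).sum

theorem seg_length {α : Type} (xs : List α) (start i : Nat) (h : i ≤ xs.length) :
    (seg xs start i).length = i - start := by
  simp [seg]; omega

theorem seg_self {α : Type} (xs : List α) (i : Nat) : seg xs i i = [] := by
  simp [seg]

theorem seg_snoc {α : Type} (xs : List α) (start i : Nat) (hsi : start ≤ i)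
    (h : i < xs.length) :
    seg xs start i ++ [xs[i]] = seg xs start (i + 1) := by
  unfold seg
  have h1 : i - start < (xs.drop start).length := by simp; omega
  have h2 : (xs.drop start)[i - start] = xs[i] := by
    have h3 : start + (i - start) = i := by omega
    simp [List.getElem_drop, h3]
  rw [show i + 1 - start = (i - start) + 1 by omega, List.take_add_one,
    List.getElem?_eq_getElem h1, h2]
  rfl

theorem sC_self (matrix : List (List String)) (i : Nat) : sC matrix i i = 0 := by
  simp [sC, seg_self]

theorem sC_snoc (matrix : List (List String)) (start i : Nat) (hsi : start ≤ i)
    (h : i < matrix.length) :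
    sC matrix start i + pyRowChars matrix[i] = sC matrix start (i + 1) := by
  have h' : i < (matrix.map pyRowChars).length := by simpa using h
  have hs := seg_snoc (matrix.map pyRowChars) start i hsi h'
  unfold sC
  rw [← hs, List.sum_append]
  simp

-- the common recursion both loop structures unfold to: pending batch is matrix[start:i]
def restA (matrix : List (List String)) (max_rows max_chars : Int) (start i : Nat) :
    List (Int × List (List String)) :=
  if h : i < matrix.length then
    if hg : start < i ∧ (((i - start : Nat) : Int) ≥ max_rows ∨
        sC matrix start i + pyRowChars matrix[i] > max_chars) then
      ((start : Int) + 1, seg matrix start i) :: restA matrix max_rows max_chars i i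
    else restA matrix max_rows max_chars start (i + 1)
  else
    if start < i then [((start : Int) + 1, seg matrix start i)] else []
termination_by 2 * (matrix.length - i) + (if start < i then 1 else 0)
decreasing_by
  · have h1 : start < i := hg.1
    rw [if_neg (lt_irrefl i), if_pos h1]
    omega
  · split_ifs <;> omega

-- unfolding lemmas for restA
theorem restA_flush (matrix : List (List String)) (max_rows max_chars : Int) (start i : Nat)
    (h : i < matrix.length)
    (hg : start < i ∧ (((i - start : Nat) : Int) ≥ max_rows ∨
        sC matrix start i + pyRowChars matrix[i] > max_chars)) :
    restA matrix max_rows max_chars start i =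
      ((start : Int) + 1, seg matrix start i) :: restA matrix max_rows max_chars i i := by
  rw [restA, dif_pos h, dif_pos hg]

theorem restA_skip (matrix : List (List String)) (max_rows max_chars : Int) (start i : Nat)
    (h : i < matrix.length)
    (hg : ¬ (start < i ∧ (((i - start : Nat) : Int) ≥ max_rows ∨
        sC matrix start i + pyRowChars matrix[i] > max_chars))) :
    restA matrix max_rows max_chars start i = restA matrix max_rows max_chars start (i + 1) := by
  rw [restA, dif_pos h, dif_neg hg]

theorem restA_self (matrix : List (List String)) (max_rows max_chars : Int) (i : Nat)
    (h : i < matrix.length) :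
    restA matrix max_rows max_chars i i = restA matrix max_rows max_chars i (i + 1) := by
  apply restA_skip matrix max_rows max_chars i i h
  intro hc
  exact absurd hc.1 (lt_irrefl i)

-- seg is nonempty exactly when start < i (for i in range)
theorem seg_ne_nil (matrix : List (List String)) (start i : Nat) (hil : i ≤ matrix.length)
    (hsi : start < i) : seg matrix start i ≠ [] := by
  have := seg_length matrix start i hil
  intro hnil
  rw [hnil] at this
  simp at this
  omega

-- the i = matrix.length case of the A-side correspondence
theorem restA_eq_A_top (matrix : List (List String)) (max_rows max_chars : Int)
    (start : Nat) (hsl : start < matrix.length) (fuel : Nat) :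
    restA matrix max_rows max_chars start matrix.length =
      ((start : Int) + 1,
        pyInnerA max_rows max_chars (matrix.drop matrix.length)
          (seg matrix start matrix.length) (sC matrix start matrix.length)) ::
        pyOuterA matrix max_rows max_chars
          (start + (pyInnerA max_rows max_chars (matrix.drop matrix.length)
            (seg matrix start matrix.length) (sC matrix start matrix.length)).length) fuel := by
  rw [restA, dif_neg (lt_irrefl _), if_pos hsl]
  rw [show matrix.drop matrix.length = [] by simp]
  show _ = ((start : Int) + 1, seg matrix start matrix.length) ::
    pyOuterA matrix max_rows max_chars (start + (seg matrix start matrix.length).length) fuel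
  have hlen : start + (seg matrix start matrix.length).length = matrix.length := by
    rw [seg_length matrix start matrix.length le_rfl]; omega
  rw [hlen, pyOuterA_stop matrix max_rows max_chars matrix.length (lt_irrefl _) fuel]

-- A's nested loops compute restA
theorem restA_eq_A (matrix : List (List String)) (max_rows max_chars : Int) :
    ∀ (n i start : Nat), matrix.length - i ≤ n → start ≤ i → i ≤ matrix.length →
      start < matrix.length →
      ∀ (fuel : Nat), matrix.length - i ≤ fuel →
      restA matrix max_rows max_chars start i =
        ((start : Int) + 1,
          pyInnerA max_rows max_chars (matrix.drop i) (seg matrix start i) (sC matrix start i)) ::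
          pyOuterA matrix max_rows max_chars
            (start + (pyInnerA max_rows max_chars (matrix.drop i) (seg matrix start i)
              (sC matrix start i)).length) fuel := by
  intro n
  induction n with
  | zero =>
      intro i start hn hsi hil hsl fuel hf
      have hi : i = matrix.length := by omega
      subst hi
      exact restA_eq_A_top matrix max_rows max_chars start hsl fuel
  | succ m ih =>
      intro i start hn hsi hil hsl fuel hf
      by_cases hi : i < matrix.length
      · by_cases hg : start < i ∧ (((i - start : Nat) : Int) ≥ max_rows ∨
            sC matrix start i + pyRowChars matrix[i] > max_chars)
        · -- flush: A's inner loop stops here and the outer loop restarts at i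
          rw [restA_flush matrix max_rows max_chars start i hi hg]
          rw [restA_self matrix max_rows max_chars i hi]
          have hinner : pyInnerA max_rows max_chars (matrix.drop i) (seg matrix start i)
              (sC matrix start i) = seg matrix start i := by
            rw [List.drop_eq_getElem_cons hi, pyInnerA_cons]
            apply if_pos
            refine ⟨seg_ne_nil matrix start i hil hg.1, ?_⟩
            rw [seg_length matrix start i hil]
            exact hg.2
          rw [hinner]
          have hlen : start + (seg matrix start i).length = i := by
            rw [seg_length matrix start i hil]; omega
          rw [hlen]
          obtain ⟨f, rfl⟩ : ∃ f, fuel = f + 1 := ⟨fuel - 1, by omega⟩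
          conv_rhs => rw [pyOuterA]
          rw [if_pos hi]
          -- A's inner loop from i with [] makes the same first step
          have hstep : pyInnerA max_rows max_chars (matrix.drop i) [] 0 =
              pyInnerA max_rows max_chars (matrix.drop (i + 1)) (seg matrix i (i + 1))
                (sC matrix i (i + 1)) := by
            rw [List.drop_eq_getElem_cons hi, pyInnerA_cons, if_neg (by simp)]
            congr 1
            · have := seg_snoc matrix i i (le_refl _) hi
              rw [seg_self] at this
              simpa using this
            · have := sC_snoc matrix i i (le_refl _) hi
              rw [sC_self] at this
              simpa using this
          rw [hstep]
          exact congrArg (List.cons ((start : Int) + 1, seg matrix start i))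
            (ih (i + 1) i (by omega) (by omega) (by omega) hi f (by omega))
        · rw [restA_skip matrix max_rows max_chars start i hi hg]
          rw [ih (i + 1) start (by omega) (by omega) (by omega) hsl fuel (by omega)]
          have hstep : pyInnerA max_rows max_chars (matrix.drop i) (seg matrix start i)
              (sC matrix start i) =
              pyInnerA max_rows max_chars (matrix.drop (i + 1)) (seg matrix start (i + 1))
                (sC matrix start (i + 1)) := by
            rw [List.drop_eq_getElem_cons hi, pyInnerA_cons, if_neg]
            · rw [seg_snoc matrix start i hsi hi, sC_snoc matrix start i hsi hi]
            · rintro ⟨hne, hc⟩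
              apply hg
              have hpos : start < i := by
                rcases Nat.lt_or_ge start i with h' | h'
                · exact h'
                · exact absurd (by simp [seg, show i - start = 0 by omega]) hne
              refine ⟨hpos, ?_⟩
              rwa [seg_length matrix start i hil] at hc
          rw [hstep]
      · have hieq : i = matrix.length := by omega
        subst hieq
        exact restA_eq_A_top matrix max_rows max_chars start hsl fuel

-- B's final flush, as a named function of the fold state
def finishB (matrix : List (List String)) (st : List (Int × List (List String)) × Int × Int × Int) :
    List (Int × List (List String)) :=
  match st with
  | (batches, s, bl, _) =>
    if bl ≠ 0 then
      batches ++ [(s + 1, PySem.List.slice matrix (some s) (some (s + bl)))]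
    else batches

-- B's port is finishB applied to its fold
theorem alt_eq_finishB (matrix : List (List String)) (max_rows max_chars : Int) :
    matrix_batches_py_alt matrix max_rows max_chars =
      finishB matrix ((matrix.map pyRowChars).foldl (altStep matrix max_rows max_chars)
        ([], 0, 0, 0)) := by
  rcases hst : (matrix.map pyRowChars).foldl (altStep matrix max_rows max_chars) ([], 0, 0, 0)
    with ⟨b, s, bl, c⟩
  simp only [matrix_batches_py_alt, finishB, hst]

-- the i = matrix.length case of the B-side correspondence
theorem foldB_top (matrix : List (List String)) (max_rows max_chars : Int)
    (start : Nat) (out : List (Int × List (List String))) (hsl : start ≤ matrix.length) :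
    finishB matrix (out, (start : Int), ((matrix.length - start : Nat) : Int),
        sC matrix start matrix.length) =
      out ++ restA matrix max_rows max_chars start matrix.length := by
  rw [restA, dif_neg (lt_irrefl _)]
  by_cases hs : start < matrix.length
  · rw [if_pos hs]
    have hbl : ((matrix.length - start : Nat) : Int) ≠ 0 :=
      Int.natCast_ne_zero.mpr (by omega)
    simp only [finishB]
    rw [if_pos hbl, PySem.List.slice_natCast_add]
    rfl
  · have hse : start = matrix.length := by omega
    subst hse
    simp [finishB]

-- B's flat fold computes restA too
theorem foldB_eq_restA (matrix : List (List String)) (max_rows max_chars : Int) :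
    ∀ (n i start : Nat) (out : List (Int × List (List String))),
      matrix.length - i ≤ n → start ≤ i → i ≤ matrix.length →
      finishB matrix (((matrix.map pyRowChars).drop i).foldl (altStep matrix max_rows max_chars)
          (out, (start : Int), ((i - start : Nat) : Int), sC matrix start i)) =
        out ++ restA matrix max_rows max_chars start i := by
  intro n
  induction n with
  | zero =>
      intro i start out hn hsi hil
      have hi : i = matrix.length := by omega
      subst hi
      rw [show (matrix.map pyRowChars).drop matrix.length = [] by simp, List.foldl_nil]
      exact foldB_top matrix max_rows max_chars start out hsi
  | succ m ih =>
      intro i start out hn hsi hil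
      by_cases hi : i < matrix.length
      · have hi' : i < (matrix.map pyRowChars).length := by simpa using hi
        have hdrop : (matrix.map pyRowChars).drop i =
            pyRowChars matrix[i] :: (matrix.map pyRowChars).drop (i + 1) := by
          rw [List.drop_eq_getElem_cons hi']
          simp
        rw [hdrop, List.foldl_cons]
        by_cases hg : start < i ∧ (((i - start : Nat) : Int) ≥ max_rows ∨
            sC matrix start i + pyRowChars matrix[i] > max_chars)
        · have hbl : ((i - start : Nat) : Int) ≠ 0 := Int.natCast_ne_zero.mpr (by omega)
          have hstep : altStep matrix max_rows max_chars
              (out, (start : Int), ((i - start : Nat) : Int), sC matrix start i)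
              (pyRowChars matrix[i]) =
              (out ++ [((start : Int) + 1, seg matrix start i)], (i : Int),
                ((i + 1 - i : Nat) : Int), sC matrix i (i + 1)) := by
            simp only [altStep]
            rw [if_pos ⟨hbl, hg.2⟩, PySem.List.slice_natCast_add]
            have hsum : (start : Int) + ((i - start : Nat) : Int) = (i : Int) := by
              omega
            have hchars : (0 : Int) + pyRowChars matrix[i] = sC matrix i (i + 1) := by
              have := sC_snoc matrix i i (le_refl _) hi
              rw [sC_self] at this
              simpa using this
            have hone : ((0 : Int) + 1) = ((i + 1 - i : Nat) : Int) := by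
              omega
            rw [hsum, hchars, hone]
            rfl
          rw [hstep]
          rw [ih (i + 1) i (out ++ [((start : Int) + 1, seg matrix start i)])
            (by omega) (by omega) (by omega)]
          rw [restA_flush matrix max_rows max_chars start i hi hg,
            restA_self matrix max_rows max_chars i hi]
          simp
        · have hstep : altStep matrix max_rows max_chars
              (out, (start : Int), ((i - start : Nat) : Int), sC matrix start i)
              (pyRowChars matrix[i]) =
              (out, (start : Int), ((i + 1 - start : Nat) : Int), sC matrix start (i + 1)) := by
            simp only [altStep]
            rw [if_neg]
            · have h1 : ((i - start : Nat) : Int) + 1 = ((i + 1 - start : Nat) : Int) := by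
                omega
              rw [h1, sC_snoc matrix start i hsi hi]
            · rintro ⟨hne, hc⟩
              apply hg
              have hpos : start < i := by
                rcases Nat.lt_or_ge start i with h' | h'
                · exact h'
                · exact absurd (by simp [show i - start = 0 by omega]) hne
              exact ⟨hpos, hc⟩
          rw [hstep]
          rw [ih (i + 1) start out (by omega) (by omega) (by omega)]
          rw [restA_skip matrix max_rows max_chars start i hi hg]
      · have hieq : i = matrix.length := by omega
        subst hieq
        rw [show (matrix.map pyRowChars).drop matrix.length = [] by simp, List.foldl_nil]
        exact foldB_top matrix max_rows max_chars start out hsi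

theorem restA_zero (matrix : List (List String)) (max_rows max_chars : Int) :
    restA matrix max_rows max_chars 0 0 =
      pyOuterA matrix max_rows max_chars 0 matrix.length := by
  by_cases h0 : 0 < matrix.length
  · obtain ⟨f, hf⟩ : ∃ f, matrix.length = f + 1 := ⟨matrix.length - 1, by omega⟩
    rw [restA_eq_A matrix max_rows max_chars matrix.length 0 0 (by omega) (by omega)
      (by omega) h0 matrix.length (by omega)]
    conv_rhs => rw [hf, pyOuterA]
    rw [if_pos h0]
    rw [seg_self, sC_self]
    have hpos := pyInnerA_drop_pos matrix max_rows max_chars 0 h0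
    congr 1
    apply pyOuterA_fuel <;> omega
  · rw [restA, dif_neg h0, pyOuterA_stop matrix max_rows max_chars 0 h0]
    simp
-- ===== VERDICT (by name: the statement is the Claim_ definition above) =====
theorem matrix_batches_py_spec : Claim_equal_matrix_batches_py := by
  intro matrix max_rows max_chars _
  unfold Spec_matrix_batches_py matrix_batches_py
  rw [alt_eq_finishB]
  have h := foldB_eq_restA matrix max_rows max_chars matrix.length 0 0 []
    (by omega) (by omega) (by omega)
  rw [restA_zero] at h
  simp only [Nat.sub_zero, Nat.cast_zero, sC_self, List.drop_zero, List.nil_append] at h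
  exact h.symm
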